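-- pv_equiv track=rewrite | github.com/liskos/artemsaveliev | варианты/шастин/6/15.py | f
-- ===== SOURCE A (Python) =====
-- def f(a):
--     b = range(34*10, 72*10+1)
--     c = range(32*10, 61*10+1)
--     for x in range(1, 1000):
--         f = ((x not in b) or (x in a)) and ((x not in c) or (x in a))
--         if not f:
--             return False
--     return True
-- ===== SOURCE B (Python) =====
-- def f(a):
--     needed = set(range(320, 721))
--     for x in a:
--         needed.discard(x)
--     return not needed
-- ===== Notes on version B (the rewrite author's own statement) =====
-- stated objective: alternative
-- what changed: Instead of probing the list a once for each of the 999 candidate numbers with early exit, B builds the required set 320..720 once and makes a single pass over a, discarding seen values; the answer is whether the missing-set is empty.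
import Mathlib
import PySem

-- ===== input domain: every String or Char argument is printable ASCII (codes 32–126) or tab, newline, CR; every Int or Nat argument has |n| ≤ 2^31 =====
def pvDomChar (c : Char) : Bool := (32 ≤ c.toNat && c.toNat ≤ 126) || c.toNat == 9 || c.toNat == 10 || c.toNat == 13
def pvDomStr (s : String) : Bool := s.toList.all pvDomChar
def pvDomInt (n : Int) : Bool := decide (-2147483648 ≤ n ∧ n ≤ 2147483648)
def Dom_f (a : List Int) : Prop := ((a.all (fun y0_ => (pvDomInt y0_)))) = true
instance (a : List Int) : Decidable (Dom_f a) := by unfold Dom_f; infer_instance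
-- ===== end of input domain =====

-- B replaces A's 999 membership probes of the list by one pass over the list that strikes
-- seen values off the required set 320..720; equivalence of the two is proved below.

-- ===== PORT A =====
-- the for-loop with its early 'return False'
def fLoopA (a b c : List Int) : List Int → Bool
  | [] => true
  | x :: xs =>
    let fv := ((!(b.contains x)) || a.contains x) && ((!(c.contains x)) || a.contains x)
    if !fv then false else fLoopA a b c xs

def f (a : List Int) : Bool :=
  let b := PySem.List.pyRange (34*10) (72*10+1) 1
  let c := PySem.List.pyRange (32*10) (61*10+1) 1
  fLoopA a b c (PySem.List.pyRange 1 1000 1)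

-- ===== PORT B =====
def f_alt (a : List Int) : Bool :=
  let needed : PySem.Set Int := PySem.Set.ofList (PySem.List.pyRange 320 721 1)
  let needed := a.foldl (fun s x => PySem.Set.discard s x) needed
  needed.isEmpty

-- ===== PRECONDITION & SPEC =====
def Spec_f (a : List Int) (out : Bool) : Prop := out = f_alt a
instance (a : List Int) (out : Bool) : Decidable (Spec_f a out) := by unfold Spec_f; infer_instance

-- ===== CLAIM (what is proved, stated in full; the proofs are below) =====
def Claim_equal_f : Prop := ∀ (a : List Int), Dom_f a → Spec_f a (f a)

-- ===== LEMMAS AND PROOFS =====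

-- A's loop with early return is List.all of the body
theorem fLoopA_eq_all (a b c : List Int) (xs : List Int) :
    fLoopA a b c xs
      = xs.all (fun x => ((!(b.contains x)) || a.contains x) && ((!(c.contains x)) || a.contains x)) := by
  induction xs with
  | nil => rfl
  | cons x xs ih =>
    simp only [fLoopA, List.all_cons]
    cases hfv : (((!(b.contains x)) || a.contains x) && ((!(c.contains x)) || a.contains x)) <;>
      simp [hfv, ih]

theorem f_eq_true_iff (a : List Int) :
    f a = true ↔ ∀ x : Int, 320 ≤ x → x ≤ 720 → x ∈ a := by
  unfold f
  rw [fLoopA_eq_all]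
  simp only [List.all_eq_true, PySem.List.mem_pyRange_one, Bool.and_eq_true, Bool.or_eq_true,
    Bool.not_eq_eq_eq_not, Bool.not_true, List.contains_eq_mem, decide_eq_true_eq,
    decide_eq_false_iff_not, not_and, not_lt]
  constructor
  · intro h x h1 h2
    have := h x (by omega)
    rcases this.1 with h' | h'
    · rcases this.2 with h'' | h''
      · omega
      · exact h''
    · exact h'
  · intro h x _
    constructor
    · by_cases hx : 340 ≤ x ∧ x < 721
      · exact Or.inr (h x (by omega) (by omega))
      · exact Or.inl (by omega)
    · by_cases hx : 320 ≤ x ∧ x < 611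
      · exact Or.inr (h x (by omega) (by omega))
      · exact Or.inl (by omega)

-- membership in the set after discarding every element of the list
theorem mem_foldl_discard (l : List Int) (s : PySem.Set Int) (y : Int) :
    y ∈ l.foldl (fun s x => PySem.Set.discard s x) s ↔ y ∈ s ∧ y ∉ l := by
  induction l generalizing s with
  | nil => simp
  | cons x xs ih =>
    simp only [List.foldl_cons, ih, PySem.Set.mem_discard, List.mem_cons]
    constructor
    · rintro ⟨⟨hs, hne⟩, hnx⟩
      exact ⟨hs, by rintro (rfl | h) <;> [exact hne rfl; exact hnx h]⟩
    · rintro ⟨hs, hn⟩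
      exact ⟨⟨hs, fun h => hn (Or.inl h)⟩, fun h => hn (Or.inr h)⟩

theorem f_alt_eq_true_iff (a : List Int) :
    f_alt a = true ↔ ∀ x : Int, 320 ≤ x → x ≤ 720 → x ∈ a := by
  unfold f_alt
  rw [List.isEmpty_iff, List.eq_nil_iff_forall_not_mem]
  constructor
  · intro h x h1 h2
    by_contra hxa
    exact h x ((mem_foldl_discard a _ x).mpr
      ⟨by simp [PySem.Set.mem_ofList, PySem.List.mem_pyRange_one]; omega, hxa⟩)
  · intro h y hy
    rcases (mem_foldl_discard a _ y).mp hy with ⟨hs, hna⟩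
    have : 320 ≤ y ∧ y < 721 := by
      simpa [PySem.Set.mem_ofList, PySem.List.mem_pyRange_one] using hs
    exact hna (h y (by omega) (by omega))

-- ===== VERDICT (by name: the statement is the Claim_ definition above) =====
theorem f_spec : Claim_equal_f := by
  intro a _
  unfold Spec_f
  exact Bool.eq_iff_iff.mpr ((f_eq_true_iff a).trans (f_alt_eq_true_iff a).symm)
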